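-- pv_equiv track=rewrite | github.com/daniel-reich/ubiquitous-fiesta | n2y4i74e9mFdwHNCi_17.py | get_items_at
-- ===== SOURCE A (Python) =====
-- def get_items_at(*args):
--
--   Parameters = []
--
--   for arg in args:
--     Parameters.append(arg)
--
--   if (len(Parameters) == 2):
--     Parameters.append([])
--     Parameters.append(1)
--
--   Sample = Parameters[0]
--   Wanted = Parameters[1]
--   Answer = Parameters[2]
--   Instance = Parameters[3]
--
--   if (Sample == []):
--     return Answer
--
--   elif (Instance % 2 == 0) and (Wanted == "even"):
--     Answer.insert(0, Sample[-1])
--     Sample = Sample[0:-1]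
--     Instance += 1
--     return get_items_at(Sample, Wanted, Answer, Instance)
--
--   elif (Instance % 2 != 0) and (Wanted == "odd"):
--     Answer.insert(0, Sample[-1])
--     Sample = Sample[0:-1]
--     Instance += 1
--     return get_items_at(Sample, Wanted, Answer, Instance)
--
--   else:
--     Sample = Sample[0:-1]
--     Instance += 1
--     return get_items_at(Sample, Wanted, Answer, Instance)
-- ===== SOURCE B (Python) =====
-- def get_items_at(*args):
--     if len(args) == 2:
--         Sample, Wanted, Answer, Instance = args[0], args[1], [], 1
--     else:
--         Sample, Wanted, Answer, Instance = args
--     n = len(Sample)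
--     # element at index i (0-based) has "Instance" value Instance + (n - 1 - i)
--     if Wanted == "even":
--         picked = [x for i, x in enumerate(Sample) if (Instance + n - 1 - i) % 2 == 0]
--     elif Wanted == "odd":
--         picked = [x for i, x in enumerate(Sample) if (Instance + n - 1 - i) % 2 == 1]
--     else:
--         picked = []
--     return picked + Answer
-- ===== Notes on version B (the rewrite author's own statement) =====
-- stated objective: faster
-- what changed: Replaced A's recursion that copies the list (Sample[0:-1]) and does Answer.insert(0, ...) at every step with a single enumerate pass selecting elements whose 1-based position from the right has the wanted parity.
import Mathlib
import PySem

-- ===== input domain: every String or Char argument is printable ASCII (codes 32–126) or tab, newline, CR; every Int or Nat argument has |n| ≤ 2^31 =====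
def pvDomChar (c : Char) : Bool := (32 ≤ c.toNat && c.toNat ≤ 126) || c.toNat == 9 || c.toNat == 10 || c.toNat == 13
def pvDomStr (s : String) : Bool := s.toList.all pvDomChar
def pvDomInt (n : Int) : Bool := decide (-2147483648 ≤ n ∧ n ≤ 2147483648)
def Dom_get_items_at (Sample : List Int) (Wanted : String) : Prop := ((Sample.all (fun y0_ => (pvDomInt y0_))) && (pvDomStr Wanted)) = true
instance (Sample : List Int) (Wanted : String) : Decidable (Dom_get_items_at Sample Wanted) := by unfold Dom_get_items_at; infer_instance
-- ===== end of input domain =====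

-- B replaces A's quadratic copy-and-prepend recursion by one linear pass selecting by position parity from the right (return value equivalence; A mutates its Answer argument only in its internal recursive calls).

-- ===== PORT A =====
-- recursive worker: the body of A after the varargs/Parameters prologue filled Answer=[] and Instance=1
def get_items_at_go (Sample : List Int) (Wanted : String) (Answer : List Int) (Inst : Int) : List Int :=
  if h : Sample = [] then Answer
  else if PySem.Int.mod Inst 2 = 0 ∧ Wanted = "even" then
    get_items_at_go (PySem.List.slice Sample none (some (-1))) Wanted
      (PySem.List.insert Answer 0 (PySem.List.pyGetD Sample (-1) 0)) (Inst + 1)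
  else if ¬ PySem.Int.mod Inst 2 = 0 ∧ Wanted = "odd" then
    get_items_at_go (PySem.List.slice Sample none (some (-1))) Wanted
      (PySem.List.insert Answer 0 (PySem.List.pyGetD Sample (-1) 0)) (Inst + 1)
  else
    get_items_at_go (PySem.List.slice Sample none (some (-1))) Wanted Answer (Inst + 1)
termination_by Sample.length
decreasing_by
  all_goals
    simp only [PySem.List.slice_to_neg_one, List.length_dropLast]
    have := List.length_pos_iff.mpr h
    omega

def get_items_at (Sample : List Int) (Wanted : String) : List Int :=
  get_items_at_go Sample Wanted [] 1

-- ===== PORT B =====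
def get_items_at_alt (Sample : List Int) (Wanted : String) : List Int :=
  let n : Int := PySem.List.len Sample
  let picked : List Int :=
    if Wanted = "even" then
      (PySem.List.enumerate Sample).filterMap
        (fun p => if PySem.Int.mod (1 + n - 1 - p.1) 2 = 0 then some p.2 else none)
    else if Wanted = "odd" then
      (PySem.List.enumerate Sample).filterMap
        (fun p => if PySem.Int.mod (1 + n - 1 - p.1) 2 = 1 then some p.2 else none)
    else []
  picked ++ []

-- ===== PRECONDITION & SPEC =====
def Spec_get_items_at (Sample : List Int) (Wanted : String) (out : List Int) : Prop := out = get_items_at_alt Sample Wanted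
instance (Sample : List Int) (Wanted : String) (out : List Int) : Decidable (Spec_get_items_at Sample Wanted out) := by unfold Spec_get_items_at; infer_instance

-- ===== CLAIM (what is proved, stated in full; the proofs are below) =====
def Claim_equal_get_items_at : Prop := ∀ (Sample : List Int) (Wanted : String), Dom_get_items_at Sample Wanted → Spec_get_items_at Sample Wanted (get_items_at Sample Wanted)

-- ===== LEMMAS AND PROOFS =====

-- the selection condition A applies to an element whose running Instance counter is I
def pvSel (W : String) (I : Int) : Bool :=
  (PySem.Int.mod I 2 == 0 && W == "even") || (!(PySem.Int.mod I 2 == 0) && W == "odd")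

-- A's recursion, rephrased structurally on the REVERSE of Sample
def pvAux (W : String) : List Int → Int → List Int
  | [], _ => []
  | x :: r, I => pvAux W r (I + 1) ++ (if pvSel W I then [x] else [])

lemma go_spec (r : List Int) : ∀ (W : String) (Ans : List Int) (I : Int),
    get_items_at_go r.reverse W Ans I = pvAux W r I ++ Ans := by
  induction r with
  | nil => intro W Ans I; simp [get_items_at_go, pvAux]
  | cons x r' ih =>
    intro W Ans I
    rw [List.reverse_cons, get_items_at_go]
    have hne : r'.reverse ++ [x] ≠ [] := by simp
    rw [dif_neg hne]
    simp only [PySem.List.slice_to_neg_one, List.dropLast_concat,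
      PySem.List.pyGetD_neg_one_append_singleton, PySem.List.insert_zero]
    by_cases h1 : PySem.Int.mod I 2 = 0 ∧ W = "even"
    · rw [if_pos h1, ih]
      have hs : pvSel W I = true := by
        have hd : (2 : Int) ∣ I := (PySem.Int.mod_eq_zero_iff_dvd I 2).mp h1.1
        simp [pvSel, hd, h1.2]
      rw [pvAux, if_pos hs]
      simp
    · rw [if_neg h1]
      by_cases h2 : ¬ PySem.Int.mod I 2 = 0 ∧ W = "odd"
      · rw [if_pos h2, ih]
        have hs : pvSel W I = true := by
          have hd : ¬ (2 : Int) ∣ I := fun h => h2.1 ((PySem.Int.mod_eq_zero_iff_dvd I 2).mpr h)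
          have hI1 : I % 2 = 1 := by omega
          simp [pvSel, hI1, h2.2]
        rw [pvAux, if_pos hs]
        simp
      · rw [if_neg h2, ih]
        have hs : pvSel W I = false := by
          by_cases hm : PySem.Int.mod I 2 = 0
          · have hw : ¬ W = "even" := fun hw => h1 ⟨hm, hw⟩
            have hd : (2 : Int) ∣ I := (PySem.Int.mod_eq_zero_iff_dvd I 2).mp hm
            have hI0 : I % 2 = 0 := by omega
            simp [pvSel, hI0, hw]
          · have hw : ¬ W = "odd" := fun hw => h2 ⟨hm, hw⟩
            have hd : ¬ (2 : Int) ∣ I := fun h => hm ((PySem.Int.mod_eq_zero_iff_dvd I 2).mpr h)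
            have hI1 : I % 2 = 1 := by omega
            simp [pvSel, hI1, hw]
        rw [pvAux, if_neg (by simp [hs])]
        simp

lemma aux_eq_filterMap (r : List Int) : ∀ (W : String) (I : Int),
    pvAux W r I = (PySem.List.enumerate r.reverse).filterMap
      (fun p => if pvSel W (I + (r.reverse.length : Int) - 1 - p.1) then some p.2 else none) := by
  induction r with
  | nil => intro W I; simp [pvAux]
  | cons x r' ih =>
    intro W I
    rw [pvAux, List.reverse_cons, PySem.List.enumerate_append, List.filterMap_append]
    have harg : (fun p : Int × Int =>
        if pvSel W (I + (((r'.reverse ++ [x]).length : Nat) : Int) - 1 - p.1) then some p.2 else none)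
        = (fun p : Int × Int =>
        if pvSel W ((I + 1) + ((r'.reverse.length : Nat) : Int) - 1 - p.1) then some p.2 else none) := by
      funext p
      have he : I + (((r'.reverse ++ [x]).length : Nat) : Int) - 1 - p.1
          = (I + 1) + ((r'.reverse.length : Nat) : Int) - 1 - p.1 := by
        simp only [List.length_append, List.length_cons, List.length_nil]
        push_cast
        ring
      rw [he]
    rw [harg, ← ih]
    simp only [PySem.List.enumerate_cons, PySem.List.enumerate_nil, List.filterMap_cons,
      List.filterMap_nil]
    have harg2 : (I + 1) + ((r'.reverse.length : Nat) : Int) - 1 - ((0 : Int) + (r'.reverse.length : Int)) = I := by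
      ring
    rw [harg2]
    by_cases hs : pvSel W I = true
    · simp [hs]
    · simp [hs]

lemma pvSel_even (v : Int) : pvSel "even" v = (PySem.Int.mod v 2 == 0) := by
  rcases Int.emod_two_eq v with h | h <;> simp [pvSel, h]

lemma pvSel_odd (v : Int) : pvSel "odd" v = (PySem.Int.mod v 2 == 1) := by
  rcases Int.emod_two_eq v with h | h <;> simp [pvSel, h]

lemma alt_eq_aux (Sample : List Int) (W : String) :
    get_items_at_alt Sample W = pvAux W Sample.reverse 1 := by
  rw [aux_eq_filterMap Sample.reverse W 1, List.reverse_reverse]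
  by_cases hW1 : W = "even"
  · subst hW1
    simp only [get_items_at_alt, PySem.List.len_eq, String.reduceEq, reduceIte, List.append_nil]
    apply List.filterMap_congr
    intro p _
    rw [pvSel_even]
    have he : PySem.Int.mod (1 + (Sample.length : Int) - 1 - p.1) 2
        = (1 + (Sample.length : Int) - 1 - p.1) % 2 := PySem.Int.mod_eq_emod_of_pos (by omega)
    by_cases hm : PySem.Int.mod (1 + (Sample.length : Int) - 1 - p.1) 2 = 0
    · rw [if_pos hm, if_pos (by simp; omega)]
    · rw [if_neg hm, if_neg (by simp; omega)]
  · by_cases hW2 : W = "odd"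
    · subst hW2
      simp only [get_items_at_alt, PySem.List.len_eq, String.reduceEq, reduceIte, List.append_nil]
      apply List.filterMap_congr
      intro p _
      rw [pvSel_odd]
      have he : PySem.Int.mod (1 + (Sample.length : Int) - 1 - p.1) 2
          = (1 + (Sample.length : Int) - 1 - p.1) % 2 := PySem.Int.mod_eq_emod_of_pos (by omega)
      by_cases hm : PySem.Int.mod (1 + (Sample.length : Int) - 1 - p.1) 2 = 1
      · rw [if_pos hm, if_pos (by simp; omega)]
      · rw [if_neg hm, if_neg (by simp; omega)]
    · simp only [get_items_at_alt, PySem.List.len_eq, if_neg hW1, if_neg hW2, List.append_nil]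
      have hfm : ∀ p ∈ PySem.List.enumerate Sample 0,
          (if pvSel W (1 + ((Sample.length : Nat) : Int) - 1 - p.1) then some p.2 else none) = (none : Option Int) := by
        intro p _
        rw [if_neg (by simp [pvSel, hW1, hW2])]
      rw [List.filterMap_congr hfm]
      simp

-- ===== VERDICT (by name: the statement is the Claim_ definition above) =====
theorem get_items_at_spec : Claim_equal_get_items_at := by
  intro Sample W _
  unfold Spec_get_items_at get_items_at
  have h := go_spec Sample.reverse W [] 1
  rw [List.reverse_reverse] at h
  rw [h, alt_eq_aux, List.append_nil]
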